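-- pv_equiv track=rewrite | github.com/danoscarmike/adventofcode | 2025/day1.py | part_one
-- ===== SOURCE A (Python) =====
-- class Dial:
--     def __init__(self, min: int, max: int, start: int):
--         self.min = min
--         self.max = max
--         self.length = max - min + 1
--         self.position = start
--         self.zero_crossings = 0
--
--     def turn(self, row: str) -> None:
--         if row.startswith("L"):
--             for _ in range(int(row[1:])):
--                 self.position -= 1
--                 if self.position < 0:
--                     self.position = 99
--                 if self.position == 0:
--                     self.zero_crossings += 1
--         elif row.startswith("R"):
--             for _ in range(int(row[1:])):
--                 self.position += 1
--                 if self.position > 99: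
--                     self.position = 0
--                 if self.position == 0:
--                     self.zero_crossings += 1
--
-- def part_one(rows: list) -> int:
--     dial = Dial(0, 99, 50)
--     password = 0
--     for row in rows:
--         dial.turn(row)
--         if dial.position == 0:
--             password += 1
--     return password
-- ===== SOURCE B (Python) =====
-- def part_one(rows: list) -> int:
--     # modular arithmetic per row instead of stepping the dial one tick at a time
--     position = 50
--     password = 0
--     for row in rows:
--         if row.startswith("L"):
--             position = (position - int(row[1:])) % 100
--         elif row.startswith("R"):
--             position = (position + int(row[1:])) % 100
--         if position == 0:
--             password += 1
--     return password
-- ===== Notes on version B (the rewrite author's own statement) =====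
-- stated objective: simpler
-- what changed: Replaces the Dial class and its per-tick simulation loop (one iteration per dial step, with wrap checks) by a single modular-arithmetic update (position +/- N) % 100 per row.
-- outside the precondition, e.g. on part_one(['L-50']): A returns 0, B returns 1
import Mathlib
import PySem

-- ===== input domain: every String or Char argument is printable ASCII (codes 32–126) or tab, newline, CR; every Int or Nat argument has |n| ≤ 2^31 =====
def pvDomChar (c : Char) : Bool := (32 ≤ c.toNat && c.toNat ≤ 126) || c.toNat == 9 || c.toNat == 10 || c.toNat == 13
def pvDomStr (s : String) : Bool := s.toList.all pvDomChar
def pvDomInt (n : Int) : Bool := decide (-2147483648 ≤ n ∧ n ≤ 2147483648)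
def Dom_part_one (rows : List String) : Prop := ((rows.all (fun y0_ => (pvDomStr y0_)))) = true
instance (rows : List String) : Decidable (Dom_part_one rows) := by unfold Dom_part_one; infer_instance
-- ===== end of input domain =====

-- B replaces A's one-step-at-a-time dial simulation by a single (position ± N) % 100 update per row (objective: simpler).

-- ===== PORT A =====
-- Dial state: (position, zero_crossings); min/max/length are unused constants in A.
-- one iteration of the L-loop body
def pvStepL (st : Int × Int) (_x : Int) : Int × Int :=
  let p := st.1 - 1
  let p := if p < 0 then (99 : Int) else p
  (p, if p = 0 then st.2 + 1 else st.2)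

-- one iteration of the R-loop body
def pvStepR (st : Int × Int) (_x : Int) : Int × Int :=
  let p := st.1 + 1
  let p := if p > 99 then (0 : Int) else p
  (p, if p = 0 then st.2 + 1 else st.2)

-- Dial.turn; when int(row[1:]) raises (none) Pre_ excludes the input, state kept unchanged
def pvTurn (st : Int × Int) (row : String) : Int × Int :=
  if PySem.Str.startswith row "L" then
    match PySem.Int.ofStr? (PySem.Str.slice row (some 1) none) with
    | some n => (PySem.List.pyRange 0 n 1).foldl pvStepL st
    | none => st
  else if PySem.Str.startswith row "R" then
    match PySem.Int.ofStr? (PySem.Str.slice row (some 1) none) with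
    | some n => (PySem.List.pyRange 0 n 1).foldl pvStepR st
    | none => st
  else st

def part_one (rows : List String) : Int :=
  (rows.foldl (fun (st : (Int × Int) × Int) row =>
      let d := pvTurn st.1 row
      (d, if d.1 = 0 then st.2 + 1 else st.2)) ((50, 0), 0)).2

-- ===== PORT B =====
-- per-row position update of B (modular arithmetic; .getD 0 only reached outside Pre_, where Python B raises)
def pvAltPos (p : Int) (row : String) : Int :=
  if PySem.Str.startswith row "L" then
    PySem.Int.mod (p - (PySem.Int.ofStr? (PySem.Str.slice row (some 1) none)).getD 0) 100
  else if PySem.Str.startswith row "R" then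
    PySem.Int.mod (p + (PySem.Int.ofStr? (PySem.Str.slice row (some 1) none)).getD 0) 100
  else p

def part_one_alt (rows : List String) : Int :=
  (rows.foldl (fun (st : Int × Int) row =>
      let p := pvAltPos st.1 row
      (p, if p = 0 then st.2 + 1 else st.2)) (50, 0)).2

-- ===== PRECONDITION & SPEC =====
-- Pre_ excludes rows "L…"/"R…" whose tail does not parse as an int (A raises ValueError) and rows whose tail
-- parses as a NEGATIVE int, on which A's empty range() silently ignores the row while B turns the dial by it —
-- a corner of the input format ("L"/"R" + count) no maintainer specified.
def pvRowOK (row : String) : Bool :=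
  if PySem.Str.startswith row "L" || PySem.Str.startswith row "R" then
    match PySem.Int.ofStr? (PySem.Str.slice row (some 1) none) with
    | some n => decide (0 ≤ n)
    | none => false
  else true

def Pre_part_one (rows : List String) : Prop := rows.all pvRowOK = true
instance (rows : List String) : Decidable (Pre_part_one rows) := by unfold Pre_part_one; infer_instance

def pvWitness_part_one : List String := ["L50", "R100", "R1", "hello", "L1"]

def Spec_part_one (rows : List String) (out : Int) : Prop := out = part_one_alt rows
instance (rows : List String) (out : Int) : Decidable (Spec_part_one rows out) := by unfold Spec_part_one; infer_instance

-- ===== CLAIM (what is proved, stated in full; the proofs are below) =====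
def Claim_equal_part_one : Prop := ∀ (rows : List String), Dom_part_one rows → Pre_part_one rows → Spec_part_one rows (part_one rows)

-- ===== LEMMAS AND PROOFS =====

-- the loop bodies, as unary functions (the range element is ignored)
def pvL (st : Int × Int) : Int × Int := pvStepL st 0
def pvR (st : Int × Int) : Int × Int := pvStepR st 0

-- a fold that ignores the list elements is function iteration
theorem pv_foldl_const {α β : Type} (g : α → β → α) (c : α → α) (hc : ∀ a b, g a b = c a) :
    ∀ (l : List β) (init : α), l.foldl g init = c^[l.length] init := by
  intro l
  induction l with
  | nil => intro init; simp
  | cons x xs ih =>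
    intro init
    simp [List.foldl_cons, hc, ih, Function.iterate_succ_apply]

theorem pv_iterL (k : Nat) : ∀ (p z : Int), 0 ≤ p → p < 100 →
    (pvL^[k] (p, z)).1 = PySem.Int.mod (p - k) 100 := by
  induction k with
  | zero =>
    intro p z h0 h1
    simp only [Function.iterate_zero, id_eq, Nat.cast_zero, sub_zero, add_zero]
    rw [PySem.Int.mod_eq_emod_of_pos (by omega : (0:Int) < 100)]
    omega
  | succ k ih =>
    intro p z h0 h1
    rw [Function.iterate_succ_apply]
    have hstep : pvL (p, z) =
        ((if p - 1 < 0 then (99 : Int) else p - 1),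
         if (if p - 1 < 0 then (99 : Int) else p - 1) = 0 then z + 1 else z) := rfl
    rw [hstep, ih _ _ (by split <;> omega) (by split <;> omega)]
    rw [PySem.Int.mod_eq_emod_of_pos (by omega : (0:Int) < 100),
        PySem.Int.mod_eq_emod_of_pos (by omega : (0:Int) < 100)]
    push_cast
    split <;> omega

theorem pv_iterR (k : Nat) : ∀ (p z : Int), 0 ≤ p → p < 100 →
    (pvR^[k] (p, z)).1 = PySem.Int.mod (p + k) 100 := by
  induction k with
  | zero =>
    intro p z h0 h1
    simp only [Function.iterate_zero, id_eq, Nat.cast_zero, sub_zero, add_zero]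
    rw [PySem.Int.mod_eq_emod_of_pos (by omega : (0:Int) < 100)]
    omega
  | succ k ih =>
    intro p z h0 h1
    rw [Function.iterate_succ_apply]
    have hstep : pvR (p, z) =
        ((if p + 1 > 99 then (0 : Int) else p + 1),
         if (if p + 1 > 99 then (0 : Int) else p + 1) = 0 then z + 1 else z) := rfl
    rw [hstep, ih _ _ (by split <;> omega) (by split <;> omega)]
    rw [PySem.Int.mod_eq_emod_of_pos (by omega : (0:Int) < 100),
        PySem.Int.mod_eq_emod_of_pos (by omega : (0:Int) < 100)]
    push_cast
    split <;> omega

-- on an admitted row, A's turn lands where B's modular update lands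
theorem pv_turn_eq (row : String) (p z : Int) (hok : pvRowOK row = true)
    (h0 : 0 ≤ p) (h1 : p < 100) : (pvTurn (p, z) row).1 = pvAltPos p row := by
  have hcond := hok
  unfold pvRowOK at hcond
  unfold pvTurn pvAltPos
  by_cases hL : PySem.Str.startswith row "L" = true
  · rw [if_pos hL, if_pos hL]
    cases hparse : PySem.Int.ofStr? (PySem.Str.slice row (some 1) none) with
    | none =>
      simp only [hL, hparse, Bool.true_or, if_true] at hcond
      exact absurd hcond (by simp)
    | some n =>
      simp only [hL, hparse, Bool.true_or, if_true, decide_eq_true_eq] at hcond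
      simp only [Option.getD_some]
      rw [pv_foldl_const pvStepL pvL (fun a b => rfl), PySem.List.length_pyRange_one]
      rw [pv_iterL _ p z h0 h1]
      have : (((n : Int) - 0).toNat : Int) = n := by omega
      rw [this]
  · by_cases hR : PySem.Str.startswith row "R" = true
    · rw [if_neg hL, if_pos hR, if_neg hL, if_pos hR]
      cases hparse : PySem.Int.ofStr? (PySem.Str.slice row (some 1) none) with
      | none =>
        simp only [hL, hR, hparse, Bool.false_or, if_true] at hcond
        exact absurd hcond (by simp)
      | some n =>
        simp only [hL, hR, hparse, Bool.false_or, if_true, decide_eq_true_eq] at hcond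
        simp only [Option.getD_some]
        rw [pv_foldl_const pvStepR pvR (fun a b => rfl), PySem.List.length_pyRange_one]
        rw [pv_iterR _ p z h0 h1]
        have : (((n : Int) - 0).toNat : Int) = n := by omega
        rw [this]
    · rw [if_neg hL, if_neg hR, if_neg hL, if_neg hR]

theorem pv_alt_range (p : Int) (row : String) (h0 : 0 ≤ p) (h1 : p < 100) :
    0 ≤ pvAltPos p row ∧ pvAltPos p row < 100 := by
  unfold pvAltPos
  split
  · exact ⟨PySem.Int.mod_nonneg _ (by omega), PySem.Int.mod_lt _ (by omega)⟩
  split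
  · exact ⟨PySem.Int.mod_nonneg _ (by omega), PySem.Int.mod_lt _ (by omega)⟩
  · exact ⟨h0, h1⟩

theorem pv_main : ∀ (rows : List String) (p z pw : Int), rows.all pvRowOK = true →
    0 ≤ p → p < 100 →
    (rows.foldl (fun (st : (Int × Int) × Int) row =>
        let d := pvTurn st.1 row
        (d, if d.1 = 0 then st.2 + 1 else st.2)) ((p, z), pw)).2 =
    (rows.foldl (fun (st : Int × Int) row =>
        let q := pvAltPos st.1 row
        (q, if q = 0 then st.2 + 1 else st.2)) (p, pw)).2 := by
  intro rows
  induction rows with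
  | nil => intro p z pw _ _ _; rfl
  | cons row rest ih =>
    intro p z pw hall h0 h1
    simp only [List.all_cons, Bool.and_eq_true] at hall
    have hpos := pv_turn_eq row p z hall.1 h0 h1
    have hrange := pv_alt_range p row h0 h1
    simp only [List.foldl_cons]
    have hturn : pvTurn (p, z) row = ((pvTurn (p, z) row).1, (pvTurn (p, z) row).2) := rfl
    rw [hturn, hpos]
    exact ih _ _ _ hall.2 hrange.1 hrange.2

-- ===== VERDICT (by name: the statement is the Claim_ definition above) =====
theorem part_one_spec : Claim_equal_part_one := by
  intro rows _ hpre
  unfold Spec_part_one part_one part_one_alt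
  exact pv_main rows 50 0 0 hpre (by omega) (by omega)
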